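-- pv_equiv track=rewrite | github.com/paulaharder/ClimateCrisisHackathon_AIArt | get_initial_mapping_vert.py | get_lower_path
-- ===== SOURCE A (Python) =====
-- def get_lower_path(i,j,expl_r,shape):
--     path=[]
--     count=0
--     while i<shape[0]-1 and count<expl_r:
--         i,j = step_down(i,j)
--         path.append((i,j))
--         count+=1
--     return path
--
-- def step_down(i,j):
--     return i+1, j
-- ===== SOURCE B (Python) =====
-- def get_lower_path(i, j, expl_r, shape):
--     # Build the path back-to-front: clamp the final row up front, walk the rows
--     # from the endpoint back up to i collecting pairs, then reverse once.
--     path = []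
--     r = min(i + expl_r, shape[0] - 1)
--     while r > i:
--         path.append((r, j))
--         r -= 1
--     path.reverse()
--     return path
-- ===== Notes on version B (the rewrite author's own statement) =====
-- stated objective: alternative
-- what changed: Instead of stepping down from i with a loop counter checked against expl_r each iteration, B clamps the final row up front (min(i+expl_r, shape[0]-1)), walks the rows backwards from that endpoint to i building the path in reverse, and reverses it once at the end.
import Mathlib
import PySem

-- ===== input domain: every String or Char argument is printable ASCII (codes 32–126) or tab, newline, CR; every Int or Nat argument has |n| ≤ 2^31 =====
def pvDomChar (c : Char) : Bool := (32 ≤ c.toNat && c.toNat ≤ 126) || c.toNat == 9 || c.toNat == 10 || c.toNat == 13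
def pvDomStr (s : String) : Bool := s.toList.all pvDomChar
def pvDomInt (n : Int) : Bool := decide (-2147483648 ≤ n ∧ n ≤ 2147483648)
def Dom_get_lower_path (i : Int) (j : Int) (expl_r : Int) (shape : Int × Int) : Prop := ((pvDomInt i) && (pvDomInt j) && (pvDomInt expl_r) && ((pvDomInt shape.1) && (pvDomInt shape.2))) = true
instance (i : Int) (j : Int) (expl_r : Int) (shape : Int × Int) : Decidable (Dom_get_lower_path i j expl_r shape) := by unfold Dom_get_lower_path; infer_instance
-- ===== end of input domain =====

-- B clamps the final row up front and builds the path backwards from that endpoint,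
-- reversing once at the end (objective: alternative, same cost).

-- ===== PORT A =====
def step_down (i : Int) (j : Int) : Int × Int := (i + 1, j)

-- the while-loop of A, state (i, j, count, path); terminates since count increases toward expl_r
def get_lower_path_go (shape0 : Int) (expl_r : Int) (i : Int) (j : Int) (count : Int) (path : List (Int × Int)) : List (Int × Int) :=
  if _h : i < shape0 - 1 ∧ count < expl_r then
    let p := step_down i j
    get_lower_path_go shape0 expl_r p.1 p.2 (count + 1) (path ++ [p])
  else path
termination_by (expl_r - count).toNat
decreasing_by omega

def get_lower_path (i : Int) (j : Int) (expl_r : Int) (shape : Int × Int) : List (Int × Int) :=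
  get_lower_path_go shape.1 expl_r i j 0 []

-- ===== PORT B =====
-- B's backwards while-loop: walk row r down to i, appending (r, j) each step
def get_lower_path_alt_go (i : Int) (j : Int) (r : Int) (path : List (Int × Int)) : List (Int × Int) :=
  if _h : r > i then get_lower_path_alt_go i j (r - 1) (path ++ [(r, j)])
  else path
termination_by (r - i).toNat
decreasing_by omega

def get_lower_path_alt (i : Int) (j : Int) (expl_r : Int) (shape : Int × Int) : List (Int × Int) :=
  (get_lower_path_alt_go i j (min (i + expl_r) (shape.1 - 1)) []).reverse

-- ===== PRECONDITION & SPEC =====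
def Spec_get_lower_path (i : Int) (j : Int) (expl_r : Int) (shape : Int × Int) (out : List (Int × Int)) : Prop := out = get_lower_path_alt i j expl_r shape
instance (i : Int) (j : Int) (expl_r : Int) (shape : Int × Int) (out : List (Int × Int)) : Decidable (Spec_get_lower_path i j expl_r shape out) := by unfold Spec_get_lower_path; infer_instance

-- ===== CLAIM (what is proved, stated in full; the proofs are below) =====
def Claim_equal_get_lower_path : Prop := ∀ (i : Int) (j : Int) (expl_r : Int) (shape : Int × Int), Dom_get_lower_path i j expl_r shape → Spec_get_lower_path i j expl_r shape (get_lower_path i j expl_r shape)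

-- ===== LEMMAS AND PROOFS =====

-- closed form of A's loop: it appends the ascending rows i+1 .. i+n
lemma go_eq (b e : Int) : ∀ (c i j : Int) (p : List (Int × Int)),
    get_lower_path_go b e i j c p
      = p ++ (List.range (min (e - c) (b - 1 - i)).toNat).map (fun k : Nat => (i + 1 + (k : Int), j)) := by
  intro c i j p
  induction hf : (e - c).toNat using Nat.strong_induction_on generalizing c i j p with
  | _ m ih =>
    rw [get_lower_path_go]
    by_cases h : i < b - 1 ∧ c < e
    · rw [dif_pos h]
      show get_lower_path_go b e (i + 1) j (c + 1) (p ++ [(i + 1, j)]) = _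
      have hm : (e - (c + 1)).toNat < m := by omega
      rw [ih _ hm (c + 1) (i + 1) j _ rfl]
      have hn : (min (e - c) (b - 1 - i)).toNat = (min (e - (c+1)) (b - 1 - (i+1))).toNat + 1 := by omega
      rw [hn, List.range_succ_eq_map]
      simp only [List.map_cons, List.map_map, List.append_assoc, List.cons_append,
        List.nil_append, List.singleton_append]
      congr 2
      · norm_num
      · apply List.map_congr_left
        intro a _
        simp only [Function.comp_apply]
        congr 1
        push_cast
        ring
    · rw [dif_neg h]
      have h0 : (min (e - c) (b - 1 - i)).toNat = 0 := by omega
      rw [h0]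
      simp
-- closed form of B's loop: it appends the descending rows r, r-1, .., i+1
lemma alt_go_eq (i j : Int) : ∀ (r : Int) (p : List (Int × Int)),
    get_lower_path_alt_go i j r p
      = p ++ (List.range (r - i).toNat).map (fun k : Nat => (r - (k : Int), j)) := by
  intro r p
  induction hf : (r - i).toNat using Nat.strong_induction_on generalizing r p with
  | _ m ih =>
    rw [← hf, get_lower_path_alt_go]
    by_cases h : r > i
    · rw [dif_pos h]
      have hm : (r - 1 - i).toNat < m := by omega
      rw [ih _ hm (r - 1) _ rfl]
      have hn : (r - i).toNat = (r - 1 - i).toNat + 1 := by omega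
      rw [hn, List.range_succ_eq_map]
      simp only [List.map_cons, List.map_map, List.append_assoc, List.cons_append, List.nil_append]
      congr 2
      · norm_num
      · apply List.map_congr_left
        intro a _
        simp only [Function.comp_apply]
        congr 1
        push_cast
        ring
    · rw [dif_neg h]
      have h0 : (r - i).toNat = 0 := by omega
      rw [h0]
      simp

-- reversing the descending rows gives the ascending rows
lemma rev_desc (i j : Int) (n : Nat) :
    ((List.range n).map (fun k : Nat => (i + (n : Int) - (k : Int), j))).reverse
      = (List.range n).map (fun k : Nat => (i + 1 + (k : Int), j)) := by
  apply List.ext_getElem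
  · simp
  · intro k h1 h2
    simp only [List.length_map, List.length_range] at h1 h2
    simp only [List.getElem_reverse, List.length_map, List.length_range,
      List.getElem_map, List.getElem_range]
    congr 1
    omega

-- ===== VERDICT (by name: the statement is the Claim_ definition above) =====
theorem get_lower_path_spec : Claim_equal_get_lower_path := by
  intro i j expl_r shape _
  unfold Spec_get_lower_path get_lower_path get_lower_path_alt
  rw [go_eq, alt_go_eq]
  simp only [List.nil_append]
  set r := min (i + expl_r) (shape.1 - 1) with hr
  have h1 : (min (expl_r - 0) (shape.1 - 1 - i)).toNat = (r - i).toNat := by omega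
  rw [h1]
  by_cases h : i < r
  · have hri : r = i + ((r - i).toNat : Int) := by omega
    calc (List.range (r - i).toNat).map (fun k : Nat => (i + 1 + (k : Int), j))
        = ((List.range (r - i).toNat).map (fun k : Nat => (i + ((r - i).toNat : Int) - (k : Int), j))).reverse := (rev_desc i j _).symm
      _ = ((List.range (r - i).toNat).map (fun k : Nat => (r - (k : Int), j))).reverse := by
          congr 1; apply List.map_congr_left; intro a _; congr 1; omega
  · have h0 : (r - i).toNat = 0 := by omega
    rw [h0]; simp
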